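-- pv_equiv track=rewrite | github.com/psg759/Baekjoon | 프로그래머스/0/120878. 유한소수 판별하기/유한소수 판별하기.py | solution
-- ===== SOURCE A (Python) =====
-- import math
--
-- def solution(a, b):
--     c = math.gcd(a,b)
--     if c == 1:
--         pass
--     else:
--         b //= c
--
--     while b % 2 == 0 or b % 5 == 0:
--         if b % 2 == 0:
--             b //= 2
--         elif b % 5 == 0:
--             b //= 5
--
--     if b == 1:
--         return 1
--     else:
--         return 2
-- ===== SOURCE B (Python) =====
-- import math
--
-- def solution(a, b):
--     d = b // math.gcd(a, b)
--     return 1 if d > 0 and 10 ** d.bit_length() % d == 0 else 2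
-- ===== Notes on version B (the rewrite author's own statement) =====
-- stated objective: simpler
-- what changed: Replaces A's while-loop that strips factors of 2 and 5 from the reduced denominator d with a single divisibility test: d is a finite-decimal denominator iff d > 0 and d divides 10^(d.bit_length()).
import Mathlib
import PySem

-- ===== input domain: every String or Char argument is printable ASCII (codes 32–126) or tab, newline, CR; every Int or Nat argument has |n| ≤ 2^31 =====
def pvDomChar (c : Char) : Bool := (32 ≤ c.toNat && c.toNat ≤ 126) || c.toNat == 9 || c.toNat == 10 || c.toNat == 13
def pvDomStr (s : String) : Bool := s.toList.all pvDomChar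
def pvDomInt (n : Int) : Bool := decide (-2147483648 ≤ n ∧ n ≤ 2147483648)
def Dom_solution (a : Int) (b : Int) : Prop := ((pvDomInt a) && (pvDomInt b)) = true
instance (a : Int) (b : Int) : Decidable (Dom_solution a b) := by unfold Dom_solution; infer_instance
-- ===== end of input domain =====

-- B replaces A's factor-stripping loop by one divisibility test (10^bit_length(d) % d); equal on all b ≠ 0.

-- ===== PORT A =====
-- the while-loop of A, with fuel = |b| (enough: each iteration at least halves |b|)
def stripLoop : Nat → Int → Int
  | 0, b => b
  | (f+1), b =>
    if PySem.Int.mod b 2 = 0 ∨ PySem.Int.mod b 5 = 0 then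
      stripLoop f (if PySem.Int.mod b 2 = 0 then PySem.Int.floordiv b 2 else PySem.Int.floordiv b 5)
    else b

def solution (a : Int) (b : Int) : Int :=
  let c : Int := Int.gcd a b
  let b1 : Int := if c = 1 then b else PySem.Int.floordiv b c
  let b2 : Int := stripLoop b1.natAbs b1
  if b2 = 1 then 1 else 2

-- ===== PORT B =====
def solution_alt (a : Int) (b : Int) : Int :=
  let d : Int := PySem.Int.floordiv b (Int.gcd a b)
  if 0 < d ∧ PySem.Int.mod (10 ^ PySem.Int.bitLength d) d = 0 then 1 else 2

-- ===== PRECONDITION & SPEC =====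
-- Python A does not return when b = 0 (ZeroDivisionError if a = 0, infinite loop otherwise)
def Pre_solution (a : Int) (b : Int) : Prop := b ≠ 0
instance (a : Int) (b : Int) : Decidable (Pre_solution a b) := by unfold Pre_solution; infer_instance
def pvWitness_solution : Int × Int := (3, 6)

def Spec_solution (a : Int) (b : Int) (out : Int) : Prop := out = solution_alt a b
instance (a : Int) (b : Int) (out : Int) : Decidable (Spec_solution a b out) := by unfold Spec_solution; infer_instance

-- ===== CLAIM (what is proved, stated in full; the proofs are below) =====
def Claim_equal_solution : Prop := ∀ (a : Int) (b : Int), Dom_solution a b → Pre_solution a b → Spec_solution a b (solution a b)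

-- ===== LEMMAS AND PROOFS =====

-- the loop's result r divides b with only factors 2 and 5 removed, and r has no factor 2 or 5
lemma strip_spec : ∀ (fuel : Nat) (b : Int), b ≠ 0 → b.natAbs ≤ fuel →
    (¬ (2:Int) ∣ stripLoop fuel b) ∧ (¬ (5:Int) ∣ stripLoop fuel b) ∧
    ∃ i j : Nat, b = stripLoop fuel b * 2 ^ i * 5 ^ j := by
  intro fuel
  induction fuel with
  | zero =>
    intro b hb hle
    exact absurd (Int.natAbs_eq_zero.mp (Nat.le_zero.mp hle)) hb
  | succ f ih =>
    intro b hb hle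
    by_cases hc : PySem.Int.mod b 2 = 0 ∨ PySem.Int.mod b 5 = 0
    · by_cases h2 : PySem.Int.mod b 2 = 0
      · have hdvd : (2:Int) ∣ b := (PySem.Int.mod_eq_zero_iff_dvd b 2).mp h2
        have hfd : PySem.Int.floordiv b 2 = b / 2 :=
          PySem.Int.floordiv_eq_ediv_of_pos (by norm_num)
        have hmul : b / 2 * 2 = b := Int.ediv_mul_cancel hdvd
        have hb' : b / 2 ≠ 0 := by
          intro h0; rw [h0] at hmul; simp at hmul; exact hb hmul.symm
        have habs : (b / 2).natAbs * 2 = b.natAbs := by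
          have := congrArg Int.natAbs hmul
          simpa [Int.natAbs_mul] using this
        have hle' : (b / 2).natAbs ≤ f := by
          have h1 : 1 ≤ (b / 2).natAbs := Nat.one_le_iff_ne_zero.mpr (by
            simpa [Int.natAbs_eq_zero] using hb')
          omega
        obtain ⟨hr2, hr5, i, j, hfac⟩ := ih (b / 2) hb' hle'
        have hstep : stripLoop (f+1) b = stripLoop f (b / 2) := by
          simp only [stripLoop]
          rw [if_pos hc, if_pos h2, hfd]
        refine ⟨by rw [hstep]; exact hr2, by rw [hstep]; exact hr5, i + 1, j, ?_⟩
        rw [hstep]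
        calc b = b / 2 * 2 := hmul.symm
          _ = stripLoop f (b / 2) * 2 ^ i * 5 ^ j * 2 := by rw [← hfac]
          _ = stripLoop f (b / 2) * 2 ^ (i + 1) * 5 ^ j := by ring
      · have h5 : PySem.Int.mod b 5 = 0 := hc.resolve_left h2
        have hdvd : (5:Int) ∣ b := (PySem.Int.mod_eq_zero_iff_dvd b 5).mp h5
        have hfd : PySem.Int.floordiv b 5 = b / 5 :=
          PySem.Int.floordiv_eq_ediv_of_pos (by norm_num)
        have hmul : b / 5 * 5 = b := Int.ediv_mul_cancel hdvd
        have hb' : b / 5 ≠ 0 := by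
          intro h0; rw [h0] at hmul; simp at hmul; exact hb hmul.symm
        have habs : (b / 5).natAbs * 5 = b.natAbs := by
          have := congrArg Int.natAbs hmul
          simpa [Int.natAbs_mul] using this
        have hle' : (b / 5).natAbs ≤ f := by
          have h1 : 1 ≤ (b / 5).natAbs := Nat.one_le_iff_ne_zero.mpr (by
            simpa [Int.natAbs_eq_zero] using hb')
          omega
        obtain ⟨hr2, hr5, i, j, hfac⟩ := ih (b / 5) hb' hle'
        have hstep : stripLoop (f+1) b = stripLoop f (b / 5) := by
          simp only [stripLoop]
          rw [if_pos hc, if_neg h2, hfd]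
        refine ⟨by rw [hstep]; exact hr2, by rw [hstep]; exact hr5, i, j + 1, ?_⟩
        rw [hstep]
        calc b = b / 5 * 5 := hmul.symm
          _ = stripLoop f (b / 5) * 2 ^ i * 5 ^ j * 5 := by rw [← hfac]
          _ = stripLoop f (b / 5) * 2 ^ i * 5 ^ (j + 1) := by ring
    · push_neg at hc
      have hstep : stripLoop (f+1) b = b := by
        simp only [stripLoop]
        rw [if_neg (by push_neg; exact hc)]
      refine ⟨?_, ?_, 0, 0, by rw [hstep]; ring⟩
      · rw [hstep]; exact fun h => hc.1 ((PySem.Int.mod_eq_zero_iff_dvd b 2).mpr h)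
      · rw [hstep]; exact fun h => hc.2 ((PySem.Int.mod_eq_zero_iff_dvd b 5).mpr h)

-- the two finishing tests agree on any nonzero d
lemma test_iff (d : Int) (hd : d ≠ 0) :
    (stripLoop d.natAbs d = 1) ↔ (0 < d ∧ PySem.Int.mod (10 ^ PySem.Int.bitLength d) d = 0) := by
  obtain ⟨hr2, hr5, i, j, hfac⟩ := strip_spec d.natAbs d hd le_rfl
  set r := stripLoop d.natAbs d with hr
  set e := PySem.Int.bitLength d with he
  rw [PySem.Int.mod_eq_zero_iff_dvd]
  constructor
  · intro h1
    rw [h1, one_mul] at hfac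
    have hdpos : 0 < d := by rw [hfac]; positivity
    refine ⟨hdpos, ?_⟩
    have habs : d.natAbs = 2 ^ i * 5 ^ j := by
      have := congrArg Int.natAbs hfac
      simpa [Int.natAbs_mul, Int.natAbs_pow] using this
    have hlt : d.natAbs < 2 ^ e := PySem.Int.lt_two_pow_bitLength d
    have hi : i < e := by
      have h2i : 2 ^ i ≤ d.natAbs := by
        rw [habs]; exact Nat.le_mul_of_pos_right _ (by positivity)
      exact (Nat.pow_lt_pow_iff_right (by norm_num)).mp (lt_of_le_of_lt h2i hlt)
    have hj : j < e := by
      have h5j : 5 ^ j ≤ d.natAbs := by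
        rw [habs]; exact Nat.le_mul_of_pos_left _ (by positivity)
      have h2j : 2 ^ j ≤ 5 ^ j := Nat.pow_le_pow_left (by norm_num) j
      exact (Nat.pow_lt_pow_iff_right (by norm_num)).mp
        (lt_of_le_of_lt (le_trans h2j h5j) hlt)
    have h10 : (10:Int) ^ e = 2 ^ e * 5 ^ e := by
      rw [show (10:Int) = 2 * 5 by norm_num, mul_pow]
    rw [hfac, h10]
    exact mul_dvd_mul (pow_dvd_pow 2 hi.le) (pow_dvd_pow 5 hj.le)
  · rintro ⟨hdpos, hdvd⟩
    -- r divides 10^e and is coprime to 2 and 5, hence |r| = 1; positivity forces r = 1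
    have hrd : r ∣ d := ⟨2 ^ i * 5 ^ j, by rw [hfac]; ring⟩
    have hr10 : r ∣ 10 ^ e := hrd.trans hdvd
    have hm10 : r.natAbs ∣ 10 ^ e := by
      have := Int.natAbs_dvd_natAbs.mpr hr10
      simpa [Int.natAbs_pow] using this
    have hm2 : ¬ 2 ∣ r.natAbs := fun h => hr2 (Int.natAbs_dvd_natAbs.mp (by simpa using h))
    have hm5 : ¬ 5 ∣ r.natAbs := fun h => hr5 (Int.natAbs_dvd_natAbs.mp (by simpa using h))
    have hc2 : Nat.Coprime r.natAbs 2 :=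
      (((Nat.Prime.coprime_iff_not_dvd (by norm_num)).mpr hm2)).symm
    have hc5 : Nat.Coprime r.natAbs 5 :=
      (((Nat.Prime.coprime_iff_not_dvd (by norm_num)).mpr hm5)).symm
    have hc10 : Nat.Coprime r.natAbs (10 ^ e) := by
      have : Nat.Coprime r.natAbs 10 := by
        have := Nat.Coprime.mul_right hc2 hc5
        simpa using this
      exact this.pow_right e
    have hm1 : r.natAbs = 1 := Nat.dvd_one.mp (hc10 ▸ Nat.dvd_gcd dvd_rfl hm10)
    rcases Int.natAbs_eq r with h | h <;> rw [hm1] at h <;> push_cast at h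
    · exact h
    · exfalso
      rw [h] at hfac
      nlinarith [pow_pos (show (0:Int) < 2 by norm_num) i,
        pow_pos (show (0:Int) < 5 by norm_num) j]

-- ===== VERDICT (by name: the statement is the Claim_ definition above) =====
theorem solution_spec : Claim_equal_solution := by
  intro a b _ hb
  unfold Spec_solution solution solution_alt
  have hg : (0:Int) < (Int.gcd a b : Int) := by
    have : Int.gcd a b ≠ 0 := fun h => hb (Int.gcd_eq_zero_iff.mp h).2
    exact_mod_cast Nat.pos_of_ne_zero this
  have hb1 : (if (Int.gcd a b : Int) = 1 then b else PySem.Int.floordiv b (Int.gcd a b)) =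
      PySem.Int.floordiv b (Int.gcd a b) := by
    split
    · rename_i h; rw [h, PySem.Int.floordiv_eq_ediv_of_pos (by norm_num), Int.ediv_one]
    · rfl
  simp only [hb1]
  set d : Int := PySem.Int.floordiv b (Int.gcd a b) with hd
  have hdvd : (Int.gcd a b : Int) ∣ b := Int.gcd_dvd_right a b
  have hdne : d ≠ 0 := by
    rw [hd, PySem.Int.floordiv_eq_ediv_of_pos hg]
    intro h0
    have := Int.ediv_mul_cancel hdvd
    rw [h0] at this
    simp at this
    exact hb this.symm
  have := test_iff d hdne
  split_ifs with h1 h2 h2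
  · rfl
  · exact absurd (this.mp h1) h2
  · exact absurd (this.mpr h2) h1
  · rfl
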